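-- pv_equiv track=rewrite | github.com/kelvinhuang0327/number-pattern-research | lottery-api/backtest_odd_even_combinations.py | calculate_consensus_score
-- ===== SOURCE A (Python) =====
-- def calculate_consensus_score(numbers):
--     """计算共识度得分（越低越好）"""
--     score = 0
--
--     # 生日范围（1-31）
--     birthday_count = sum(1 for n in numbers if 1 <= n <= 31)
--     score += birthday_count * 50
--
--     # 幸运数字
--     lucky_numbers = {6, 8, 9, 18, 28, 38}
--     score += sum(10 for n in numbers if n in lucky_numbers)
--
--     # 不吉利数字（降低共识）
--     unlucky_numbers = {4, 13}
--     score -= sum(5 for n in numbers if n in unlucky_numbers)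
--
--     # 连号
--     sorted_nums = sorted(numbers)
--     for i in range(len(sorted_nums) - 1):
--         if sorted_nums[i+1] - sorted_nums[i] == 1:
--             score += 15
--
--     return score
-- ===== SOURCE B (Python) =====
-- def calculate_consensus_score(numbers):
--     """计算共识度得分（越低越好）"""
--     score = 0
--     present = set()
--     for n in numbers:
--         if 1 <= n <= 31:
--             score += 50
--         if n in (6, 8, 9, 18, 28, 38):
--             score += 10
--         elif n in (4, 13):
--             score -= 5
--         present.add(n)
--     for n in present:
--         if n + 1 in present:
--             score += 15
--     return score
-- ===== Notes on version B (the rewrite author's own statement) =====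
-- stated objective: alternative
-- what changed: Replaces the three separate counting passes by a single fold that also builds a set of present values, and replaces the sort-plus-adjacent-pair scan by a membership probe 'n+1 in present' over the distinct values (one 15 per distinct consecutive pair, matching A's sorted adjacency with duplicates).
import Mathlib
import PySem

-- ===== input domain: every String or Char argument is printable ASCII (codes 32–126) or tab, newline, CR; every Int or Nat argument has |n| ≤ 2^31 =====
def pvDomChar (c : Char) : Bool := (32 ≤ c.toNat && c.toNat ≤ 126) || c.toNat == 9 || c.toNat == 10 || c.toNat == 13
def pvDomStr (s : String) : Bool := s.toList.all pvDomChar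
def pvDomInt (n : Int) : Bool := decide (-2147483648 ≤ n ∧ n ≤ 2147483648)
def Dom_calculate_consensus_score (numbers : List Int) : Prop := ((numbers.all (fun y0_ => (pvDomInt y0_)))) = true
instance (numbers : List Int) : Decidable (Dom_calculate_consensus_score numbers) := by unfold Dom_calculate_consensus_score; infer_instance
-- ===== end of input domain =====

-- B merges the three counting passes into one fold that also collects the set of present
-- values, and detects consecutive numbers by probing n+1 in that set instead of sorting.

-- ===== PORT A =====
def calculate_consensus_score (numbers : List Int) : Int :=
  let score : Int := 0
  let birthday_count : Int := (numbers.map (fun n => if 1 ≤ n ∧ n ≤ 31 then (1 : Int) else 0)).sum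
  let score := score + birthday_count * 50
  let score := score + (numbers.map (fun n => if n = 6 ∨ n = 8 ∨ n = 9 ∨ n = 18 ∨ n = 28 ∨ n = 38 then (10 : Int) else 0)).sum
  let score := score - (numbers.map (fun n => if n = 4 ∨ n = 13 then (5 : Int) else 0)).sum
  let sorted_nums := PySem.List.sorted numbers (fun x => x) false
  (PySem.List.pyRange 0 ((sorted_nums.length : Int) - 1) 1).foldl
    (fun sc i =>
      if PySem.List.pyGetD sorted_nums (i + 1) 0 - PySem.List.pyGetD sorted_nums i 0 = 1
      then sc + 15 else sc) score

-- ===== PORT B =====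
def pvStepB (p : Int × PySem.Set Int) (n : Int) : Int × PySem.Set Int :=
  let s := p.1
  let s := if 1 ≤ n ∧ n ≤ 31 then s + 50 else s
  let s := if n = 6 ∨ n = 8 ∨ n = 9 ∨ n = 18 ∨ n = 28 ∨ n = 38 then s + 10
           else if n = 4 ∨ n = 13 then s - 5 else s
  (s, PySem.Set.add p.2 n)

def calculate_consensus_score_alt (numbers : List Int) : Int :=
  let p := numbers.foldl pvStepB ((0 : Int), PySem.Set.empty)
  let present := p.2
  present.foldl (fun sc n => if PySem.Set.contains present (n + 1) then sc + 15 else sc) p.1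

-- ===== PRECONDITION & SPEC =====
def Spec_calculate_consensus_score (numbers : List Int) (out : Int) : Prop := out = calculate_consensus_score_alt numbers
instance (numbers : List Int) (out : Int) : Decidable (Spec_calculate_consensus_score numbers out) := by unfold Spec_calculate_consensus_score; infer_instance

-- ===== CLAIM (what is proved, stated in full; the proofs are below) =====
def Claim_equal_calculate_consensus_score : Prop := ∀ (numbers : List Int), Dom_calculate_consensus_score numbers → Spec_calculate_consensus_score numbers (calculate_consensus_score numbers)

-- ===== LEMMAS AND PROOFS =====

-- number of adjacent pairs at distance exactly 1 (what A's final loop counts)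
def adjOnes : List Int → Int
  | a :: b :: t => (if b - a = 1 then 1 else 0) + adjOnes (b :: t)
  | _ => 0

-- strict dedup of a weakly sorted list (proof-only helper)
def sdedup : List Int → List Int
  | a :: b :: t => if a = b then sdedup (b :: t) else a :: sdedup (b :: t)
  | l => l

theorem mem_sdedup (s : List Int) (x : Int) : x ∈ sdedup s ↔ x ∈ s := by
  induction s using sdedup.induct with
  | case1 b t ih =>
      rw [show sdedup (b :: b :: t) = sdedup (b :: t) from by simp [sdedup]]
      rw [ih]
      simp [List.mem_cons]
  | case2 a b t hne ih =>
      rw [show sdedup (a :: b :: t) = a :: sdedup (b :: t) from by simp [sdedup, hne]]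
      simp [List.mem_cons, ih]
  | case3 l hl => cases l with
      | nil => simp [sdedup]
      | cons a t => cases t with
          | nil => simp [sdedup]
          | cons b t2 => exact absurd rfl (hl a b t2)

theorem nodup_sdedup (s : List Int) (hs : s.Pairwise (· ≤ ·)) : (sdedup s).Nodup := by
  induction s using sdedup.induct with
  | case1 b t ih =>
      rcases hs with _ | ⟨hab, htail⟩
      rw [show sdedup (b :: b :: t) = sdedup (b :: t) from by simp [sdedup]]
      exact ih htail
  | case2 a b t hne ih =>
      rcases hs with _ | ⟨hab, htail⟩
      have ha : a < b := lt_of_le_of_ne (hab b (by simp)) hne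
      have hnotin : a ∉ sdedup (b :: t) := by
        rw [mem_sdedup]
        intro hmem
        rcases List.mem_cons.mp hmem with rfl | hmemt
        · omega
        · have := (List.pairwise_cons.mp htail).1 _ hmemt; omega
      rw [show sdedup (a :: b :: t) = a :: sdedup (b :: t) from by simp [sdedup, hne]]
      exact List.nodup_cons.mpr ⟨hnotin, ih htail⟩
  | case3 l hl => cases l with
      | nil => simp [sdedup]
      | cons a t => cases t with
          | nil => simp [sdedup]
          | cons b t2 => exact absurd rfl (hl a b t2)

theorem adjOnes_eq_countP (s : List Int) (hs : s.Pairwise (· ≤ ·)) :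
    adjOnes s = ((sdedup s).countP (fun v => decide ((v + 1) ∈ s)) : Int) := by
  induction s using sdedup.induct with
  | case1 b t ih =>
      rcases hs with _ | ⟨hab, htail⟩
      have hcong : ∀ v ∈ sdedup (b :: t), (decide ((v + 1) ∈ b :: b :: t) = true) ↔ (decide ((v + 1) ∈ b :: t) = true) := by
        intro v _
        simp only [decide_eq_true_eq, List.mem_cons]
        tauto
      rw [show adjOnes (b :: b :: t) = (if b - b = 1 then (1:Int) else 0) + adjOnes (b :: t) from rfl]
      rw [show sdedup (b :: b :: t) = sdedup (b :: t) from by simp [sdedup]]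
      rw [List.countP_congr hcong, ih htail]
      norm_num
  | case2 a b t hne ih =>
      rcases hs with _ | ⟨hab, htail⟩
      have hbt : ∀ x ∈ b :: t, b ≤ x := by
        intro x hx
        rcases List.mem_cons.mp hx with rfl | hxt
        · exact le_refl x
        · exact (List.pairwise_cons.mp htail).1 _ hxt
      have ha : a < b := lt_of_le_of_ne (hab b (by simp)) hne
      have hPa : ((a + 1) ∈ a :: b :: t) ↔ b - a = 1 := by
        constructor
        · intro hmem
          rcases List.mem_cons.mp hmem with h1 | h1
          · omega
          · have := hbt _ h1; omega
        · intro h1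
          have hb : b = a + 1 := by omega
          simp [List.mem_cons, hb]
      have hcong : ∀ v ∈ sdedup (b :: t), (decide ((v + 1) ∈ a :: b :: t) = true) ↔ (decide ((v + 1) ∈ b :: t) = true) := by
        intro v hv
        have hvb : b ≤ v := hbt v ((mem_sdedup _ _).mp hv)
        simp only [decide_eq_true_eq, List.mem_cons]
        constructor
        · rintro (h1 | h1)
          · omega
          · exact h1
        · tauto
      rw [show sdedup (a :: b :: t) = a :: sdedup (b :: t) from by simp [sdedup, hne]]
      rw [List.countP_cons, List.countP_congr hcong]
      rw [show adjOnes (a :: b :: t) = (if b - a = 1 then (1:Int) else 0) + adjOnes (b :: t) from rfl]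
      rw [ih htail]
      by_cases h1 : b - a = 1
      · have : ((a + 1) ∈ a :: b :: t) := hPa.mpr h1
        simp [h1, this]
        omega
      · have : ¬ ((a + 1) ∈ a :: b :: t) := fun hm => h1 (hPa.mp hm)
        simp [h1, this]
  | case3 l hl => cases l with
      | nil => simp [adjOnes, sdedup]
      | cons a t => cases t with
          | nil =>
              simp [adjOnes, sdedup]
          | cons b t2 => exact absurd rfl (hl a b t2)

-- A's index loop over the sorted list counts exactly the adjacent pairs at distance 1
theorem loopA_eq_adjOnes (s : List Int) : ∀ init : Int,
    (PySem.List.pyRange 0 ((s.length : Int) - 1) 1).foldl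
      (fun sc i =>
        if PySem.List.pyGetD s (i + 1) 0 - PySem.List.pyGetD s i 0 = 1
        then sc + 15 else sc) init = init + 15 * adjOnes s := by
  induction s using adjOnes.induct with
  | case1 a b t ih =>
      intro init
      have hlen : ((a :: b :: t).length : Int) - 1 = (((b :: t).length : Nat) : Int) := by
        push_cast [List.length_cons]; ring
      rw [hlen, PySem.List.pyRange_one_cons (by exact_mod_cast Nat.succ_pos t.length)]
      rw [List.foldl_cons]
      have h0 : (if PySem.List.pyGetD (a :: b :: t) (0 + 1) 0 - PySem.List.pyGetD (a :: b :: t) 0 0 = 1 then init + 15 else init)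
          = (if b - a = 1 then init + 15 else init) := by
        simp [pysem]
      have hr : PySem.List.pyRange (0 + 1) (((b :: t).length : Nat) : Int) 1
          = PySem.List.pyRange 1 (((b :: t).length : Nat) : Int) 1 := by norm_num
      rw [h0, hr]
      -- shift the remaining range by one and drop the head of the list
      have hshift :
          (PySem.List.pyRange 1 (((b :: t).length : Nat) : Int) 1).foldl
            (fun sc i =>
              if PySem.List.pyGetD (a :: b :: t) (i + 1) 0 - PySem.List.pyGetD (a :: b :: t) i 0 = 1
              then sc + 15 else sc) (if b - a = 1 then init + 15 else init)
          = (PySem.List.pyRange 0 (((b :: t).length : Int) - 1) 1).foldl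
            (fun sc i =>
              if PySem.List.pyGetD (b :: t) (i + 1) 0 - PySem.List.pyGetD (b :: t) i 0 = 1
              then sc + 15 else sc) (if b - a = 1 then init + 15 else init) := by
        rw [PySem.List.pyRange_one, PySem.List.pyRange_one, List.foldl_map, List.foldl_map]
        have hn : ((((b :: t).length : Nat) : Int) - 1).toNat = (((b :: t).length : Int) - 1 - 0).toNat := by omega
        rw [hn]
        congr 1
        funext sc k
        have e1 : (1 : Int) + (k : Int) + 1 = (((k + 2 : Nat)) : Int) := by push_cast; ring
        have e2 : (1 : Int) + (k : Int) = (((k + 1 : Nat)) : Int) := by push_cast; ring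
        have e3 : (0 : Int) + (k : Int) + 1 = (((k + 1 : Nat)) : Int) := by push_cast; ring
        have e4 : (0 : Int) + (k : Int) = ((k : Nat) : Int) := by ring
        rw [e1, e2, e3, e4, PySem.List.pyGetD_natCast, PySem.List.pyGetD_natCast,
            PySem.List.pyGetD_natCast, PySem.List.pyGetD_natCast]
        simp [List.getD]
      rw [hshift, ih]
      rw [show adjOnes (a :: b :: t) = (if b - a = 1 then (1:Int) else 0) + adjOnes (b :: t) from rfl]
      by_cases h1 : b - a = 1 <;> simp [h1] <;> ring
  | case2 l hl =>
      intro init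
      cases l with
      | nil =>
          rw [PySem.List.pyRange_one_eq_nil (by simp)]
          simp [adjOnes]
      | cons a t => cases t with
          | nil =>
              rw [PySem.List.pyRange_one_eq_nil (by simp)]
              simp [adjOnes]
          | cons b t2 => exact absurd rfl (hl a b t2)

-- per-element score contribution in B's single pass
def contribB (n : Int) : Int :=
  (if 1 ≤ n ∧ n ≤ 31 then 50 else 0) +
  (if n = 6 ∨ n = 8 ∨ n = 9 ∨ n = 18 ∨ n = 28 ∨ n = 38 then 10
   else if n = 4 ∨ n = 13 then -5 else 0)

theorem foldB_eq (l : List Int) : ∀ (x : Int) (s0 : PySem.Set Int),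
    l.foldl pvStepB (x, s0) = (x + (l.map contribB).sum, l.foldl PySem.Set.add s0) := by
  induction l with
  | nil => intro x s0; simp
  | cons n l ih =>
      intro x s0
      rw [List.foldl_cons, show pvStepB (x, s0) n
            = (x + contribB n, PySem.Set.add s0 n) from by
          simp only [pvStepB, contribB]
          split_ifs <;> simp <;> ring]
      rw [ih]
      simp
      ring

theorem foldl_if15 (l : List Int) (q : Int → Bool) : ∀ init : Int,
    l.foldl (fun sc n => if q n then sc + 15 else sc) init = init + 15 * (l.countP q : Int) := by
  induction l with
  | nil => intro init; simp
  | cons n l ih =>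
      intro init
      rw [List.foldl_cons, ih, List.countP_cons]
      by_cases h : q n = true <;> simp [h] <;> ring

theorem sum_contribB (l : List Int) :
    (l.map contribB).sum
      = (l.map (fun n => if 1 ≤ n ∧ n ≤ 31 then (1 : Int) else 0)).sum * 50
        + (l.map (fun n => if n = 6 ∨ n = 8 ∨ n = 9 ∨ n = 18 ∨ n = 28 ∨ n = 38 then (10 : Int) else 0)).sum
        - (l.map (fun n => if n = 4 ∨ n = 13 then (5 : Int) else 0)).sum := by
  induction l with
  | nil => simp
  | cons n l ih =>
      simp only [List.map_cons, List.sum_cons, ih, contribB]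
      split_ifs <;> ring_nf <;> omega

-- the two distinct-value counts agree
theorem count_eq (numbers : List Int) :
    (sdedup (PySem.List.sorted numbers (fun x => x) false)).countP
        (fun v => decide ((v + 1) ∈ PySem.List.sorted numbers (fun x => x) false))
      = (PySem.Set.ofList numbers).countP
        (fun n => PySem.Set.contains (PySem.Set.ofList numbers) (n + 1)) := by
  have hmemS : ∀ x : Int, x ∈ PySem.List.sorted numbers (fun x => x) false ↔ x ∈ numbers :=
    fun x => PySem.List.mem_sorted numbers (fun x => x) false x
  have hL : (sdedup (PySem.List.sorted numbers (fun x => x) false)).countP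
        (fun v => decide ((v + 1) ∈ PySem.List.sorted numbers (fun x => x) false))
      = (sdedup (PySem.List.sorted numbers (fun x => x) false)).countP
        (fun v => decide ((v + 1) ∈ numbers)) := by
    apply List.countP_congr
    intro v _
    simp only [decide_eq_true_eq]
    exact hmemS (v + 1)
  have hR : (PySem.Set.ofList numbers).countP
        (fun n => PySem.Set.contains (PySem.Set.ofList numbers) (n + 1))
      = (PySem.Set.ofList numbers).countP (fun v => decide ((v + 1) ∈ numbers)) := by
    apply List.countP_congr
    intro v _
    simp only [PySem.Set.contains, List.contains_iff_mem, decide_eq_true_eq]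
    exact PySem.Set.mem_ofList numbers (v + 1)
  have hpair : (PySem.List.sorted numbers (fun x => x) false).Pairwise (· ≤ ·) :=
    PySem.List.sorted_pairwise numbers (fun x => x)
  have hperm : (sdedup (PySem.List.sorted numbers (fun x => x) false)).Perm (PySem.Set.ofList numbers) := by
    rw [List.perm_ext_iff_of_nodup (nodup_sdedup _ hpair) (PySem.Set.nodup_ofList numbers)]
    intro x
    rw [mem_sdedup, hmemS, PySem.Set.mem_ofList]
  rw [hL, hR, hperm.countP_eq]

theorem calculate_consensus_score_spec : Claim_equal_calculate_consensus_score := by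
  intro numbers _
  unfold Spec_calculate_consensus_score
  simp only [calculate_consensus_score, calculate_consensus_score_alt]
  rw [loopA_eq_adjOnes]
  rw [adjOnes_eq_countP _ (PySem.List.sorted_pairwise numbers (fun x => x))]
  rw [foldB_eq]
  simp only []
  rw [show numbers.foldl PySem.Set.add PySem.Set.empty = PySem.Set.ofList numbers from (PySem.Set.ofList_eq_foldl numbers).symm]
  rw [foldl_if15]
  rw [← count_eq numbers]
  rw [sum_contribB]
  ring
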